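-- pv_equiv track=rewrite | github.com/qian-o/Metal.NET | .github/scripts/extract_metal_api.py | _split_enum_members
-- ===== SOURCE A (Python) =====
-- def _split_enum_members(body: str) -> list[str]:
--     """Split enum body by commas, respecting balanced parentheses."""
--     members, current, depth = [], [], 0
--     for ch in body:
--         if ch == '(':
--             depth += 1
--             current.append(ch)
--         elif ch == ')':
--             depth -= 1
--             current.append(ch)
--         elif ch == ',' and depth == 0:
--             members.append(''.join(current).strip())
--             current = []
--         else:
--             current.append(ch)
--     last = ''.join(current).strip()
--     if last:
--         members.append(last)
--     return members
-- ===== SOURCE B (Python) =====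
-- def _split_enum_members(body: str) -> list[str]:
--     """Split enum body by commas, respecting balanced parentheses.
--
--     Two-pass: first record the indices of top-level commas, then slice."""
--     depth = 0
--     cuts = []
--     for i, ch in enumerate(body):
--         if ch == '(':
--             depth += 1
--         elif ch == ')':
--             depth -= 1
--         elif ch == ',' and depth == 0:
--             cuts.append(i)
--     members = []
--     prev = 0
--     for b in cuts:
--         members.append(body[prev:b].strip())
--         prev = b + 1
--     last = body[prev:].strip()
--     if last:
--         members.append(last)
--     return members
-- ===== Notes on version B (the rewrite author's own statement) =====
-- stated objective: alternative
-- what changed: A accumulates the characters of the current member while scanning; B makes two passes: first it records the indices of all depth-0 commas, then it builds the members by slicing the body between consecutive recorded indices.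
import Mathlib
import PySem

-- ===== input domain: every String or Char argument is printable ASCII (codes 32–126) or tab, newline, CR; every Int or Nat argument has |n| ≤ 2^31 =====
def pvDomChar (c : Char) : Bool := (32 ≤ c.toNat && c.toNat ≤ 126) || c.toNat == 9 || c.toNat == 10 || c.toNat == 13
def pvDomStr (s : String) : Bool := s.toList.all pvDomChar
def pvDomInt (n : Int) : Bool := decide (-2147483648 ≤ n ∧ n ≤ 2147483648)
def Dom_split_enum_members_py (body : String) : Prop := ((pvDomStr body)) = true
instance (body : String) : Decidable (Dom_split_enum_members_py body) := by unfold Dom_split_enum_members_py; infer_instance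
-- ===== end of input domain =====

-- B replaces A's accumulate-characters loop by a two-pass form (collect top-level
-- comma indices, then slice between them); objective: alternative decomposition.

-- ===== PORT A =====
-- A's loop state: (members, current, depth)
def pvStepA (st : List String × List Char × Int) (ch : Char) : List String × List Char × Int :=
  if ch = '(' then (st.1, st.2.1 ++ [ch], st.2.2 + 1)
  else if ch = ')' then (st.1, st.2.1 ++ [ch], st.2.2 - 1)
  else if ch = ',' ∧ st.2.2 = 0 then (st.1 ++ [PySem.Str.strip (String.ofList st.2.1)], [], st.2.2)
  else (st.1, st.2.1 ++ [ch], st.2.2)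

-- last = ''.join(current).strip(); if last: members.append(last); return members
def pvFinA (st : List String × List Char × Int) : List String :=
  let last := PySem.Str.strip (String.ofList st.2.1)
  if last ≠ "" then st.1 ++ [last] else st.1

def split_enum_members_py (body : String) : List String :=
  pvFinA (body.toList.foldl pvStepA ([], [], 0))

-- ===== PORT B =====
-- B pass 1 state: (depth, cut indices)
def pvStepCut (st : Int × List Int) (p : Int × Char) : Int × List Int :=
  if p.2 = '(' then (st.1 + 1, st.2)
  else if p.2 = ')' then (st.1 - 1, st.2)
  else if p.2 = ',' ∧ st.1 = 0 then (st.1, st.2 ++ [p.1])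
  else (st.1, st.2)

-- B pass 2 state: (members, prev); members.append(body[prev:b].strip()); prev = b + 1
def pvStepSeg (L : List Char) (st : List String × Int) (b : Int) : List String × Int :=
  (st.1 ++ [PySem.Str.strip (String.ofList (PySem.List.slice L (some st.2) (some b)))], b + 1)

-- last = body[prev:].strip(); if last: members.append(last); return members
def pvFinB (L : List Char) (st : List String × Int) : List String :=
  let last := PySem.Str.strip (String.ofList (PySem.List.slice L (some st.2) none))
  if last ≠ "" then st.1 ++ [last] else st.1

def split_enum_members_py_alt (body : String) : List String :=
  let cuts := ((PySem.List.enumerate body.toList 0).foldl pvStepCut (0, [])).2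
  pvFinB body.toList (cuts.foldl (pvStepSeg body.toList) ([], 0))

-- ===== PRECONDITION & SPEC =====
def Spec_split_enum_members_py (body : String) (out : List String) : Prop := out = split_enum_members_py_alt body
instance (body : String) (out : List String) : Decidable (Spec_split_enum_members_py body out) := by unfold Spec_split_enum_members_py; infer_instance

-- ===== CLAIM (what is proved, stated in full; the proofs are below) =====
def Claim_equal_split_enum_members_py : Prop := ∀ (body : String), Dom_split_enum_members_py body → Spec_split_enum_members_py body (split_enum_members_py body)

-- ===== LEMMAS AND PROOFS =====

-- Recursive characterisation of A (proof helper).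
def pvSplitA (cur : List Char) (d : Int) : List Char → List String
  | [] =>
    let last := PySem.Str.strip (String.ofList cur)
    if last ≠ "" then [last] else []
  | c :: cs =>
    if c = '(' then pvSplitA (cur ++ [c]) (d + 1) cs
    else if c = ')' then pvSplitA (cur ++ [c]) (d - 1) cs
    else if c = ',' ∧ d = 0 then PySem.Str.strip (String.ofList cur) :: pvSplitA [] d cs
    else pvSplitA (cur ++ [c]) d cs

-- Recursive characterisation of B's first pass (Nat indices).
def pvCuts (i : Nat) (d : Int) : List Char → List Nat
  | [] => []
  | c :: cs =>
    if c = '(' then pvCuts (i + 1) (d + 1) cs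
    else if c = ')' then pvCuts (i + 1) (d - 1) cs
    else if c = ',' ∧ d = 0 then i :: pvCuts (i + 1) d cs
    else pvCuts (i + 1) d cs

theorem pvA_char (cs : List Char) : ∀ (members : List String) (cur : List Char) (d : Int),
    pvFinA (cs.foldl pvStepA (members, cur, d)) = members ++ pvSplitA cur d cs := by
  induction cs with
  | nil =>
    intro members cur d
    simp only [List.foldl_nil, pvFinA, pvSplitA]
    split_ifs <;> simp
  | cons c cs ih =>
    intro members cur d
    simp only [List.foldl_cons]
    by_cases h1 : c = '('
    · rw [show pvStepA (members, cur, d) c = (members, cur ++ [c], d + 1) from by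
          simp [pvStepA, h1],
        show pvSplitA cur d (c :: cs) = pvSplitA (cur ++ [c]) (d + 1) cs from by
          simp [pvSplitA, h1], ih]
    · by_cases h2 : c = ')'
      · rw [show pvStepA (members, cur, d) c = (members, cur ++ [c], d - 1) from by
            simp [pvStepA, h1, h2],
          show pvSplitA cur d (c :: cs) = pvSplitA (cur ++ [c]) (d - 1) cs from by
            simp [pvSplitA, h1, h2], ih]
      · by_cases h3 : c = ',' ∧ d = 0
        · rw [show pvStepA (members, cur, d) c
              = (members ++ [PySem.Str.strip (String.ofList cur)], [], d) from by
              simp [pvStepA, h1, h2, h3],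
            show pvSplitA cur d (c :: cs)
              = PySem.Str.strip (String.ofList cur) :: pvSplitA [] d cs from by
              simp [pvSplitA, h1, h2, h3], ih]
          simp
        · rw [show pvStepA (members, cur, d) c = (members, cur ++ [c], d) from by
              simp [pvStepA, h1, h2, h3],
            show pvSplitA cur d (c :: cs) = pvSplitA (cur ++ [c]) d cs from by
              simp [pvSplitA, h1, h2, h3], ih]

theorem pvCuts_char (cs : List Char) : ∀ (i : Nat) (d : Int) (acc : List Int),
    ((PySem.List.enumerate cs (i : Int)).foldl pvStepCut (d, acc)).2
      = acc ++ (pvCuts i d cs).map Int.ofNat := by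
  induction cs with
  | nil => intro i d acc; simp [PySem.List.enumerate_nil, pvCuts]
  | cons c cs ih =>
    intro i d acc
    rw [PySem.List.enumerate_cons]
    have hcast : (i : Int) + 1 = ((i + 1 : Nat) : Int) := by push_cast; ring
    simp only [List.foldl_cons]
    by_cases h1 : c = '('
    · rw [show pvStepCut (d, acc) ((i : Int), c) = (d + 1, acc) from by simp [pvStepCut, h1],
        show pvCuts i d (c :: cs) = pvCuts (i + 1) (d + 1) cs from by simp [pvCuts, h1],
        hcast, ih]
    · by_cases h2 : c = ')'
      · rw [show pvStepCut (d, acc) ((i : Int), c) = (d - 1, acc) from by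
            simp [pvStepCut, h1, h2],
          show pvCuts i d (c :: cs) = pvCuts (i + 1) (d - 1) cs from by simp [pvCuts, h1, h2],
          hcast, ih]
      · by_cases h3 : c = ',' ∧ d = 0
        · rw [show pvStepCut (d, acc) ((i : Int), c) = (d, acc ++ [(i : Int)]) from by
              simp [pvStepCut, h1, h2, h3],
            show pvCuts i d (c :: cs) = i :: pvCuts (i + 1) d cs from by
              simp [pvCuts, h1, h2, h3],
            hcast, ih]
          simp
        · rw [show pvStepCut (d, acc) ((i : Int), c) = (d, acc) from by
              simp [pvStepCut, h1, h2, h3],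
            show pvCuts i d (c :: cs) = pvCuts (i + 1) d cs from by simp [pvCuts, h1, h2, h3],
            hcast, ih]

-- The key bridge: B's second pass over the cut indices computes pvSplitA.
theorem pvKey (cs : List Char) : ∀ (L : List Char) (i prev : Nat) (d : Int) (acc : List String),
    L.drop i = cs → prev ≤ i →
    pvFinB L (((pvCuts i d cs).map Int.ofNat).foldl (pvStepSeg L) (acc, (prev : Int)))
      = acc ++ pvSplitA ((L.drop prev).take (i - prev)) d cs := by
  induction cs with
  | nil =>
    intro L i prev d acc hdrop hle
    have hlen : L.length ≤ i := by
      by_contra h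
      have : L.drop i ≠ [] := by simp [List.drop_eq_nil_iff]; omega
      exact this hdrop
    have htake : (L.drop prev).take (i - prev) = L.drop prev := by
      apply List.take_of_length_le
      simp; omega
    simp only [pvCuts, List.map_nil, List.foldl_nil, pvFinB, pvSplitA, htake,
      PySem.List.slice_from_natCast]
    split_ifs <;> simp
  | cons c cs ih =>
    intro L i prev d acc hdrop hle
    have hi : i < L.length := by
      by_contra h
      rw [List.drop_eq_nil_iff.mpr (by omega)] at hdrop
      exact (List.cons_ne_nil c cs) hdrop.symm
    have hget : L[i]? = some c := by
      rw [← List.head?_drop, hdrop]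
      rfl
    have hdrop' : L.drop (i + 1) = cs := by
      have h : L.drop (i + 1) = (L.drop i).drop 1 := by rw [List.drop_drop]
      simp [h, hdrop]
    have htake_succ : (L.drop prev).take (i + 1 - prev) = (L.drop prev).take (i - prev) ++ [c] := by
      have h1 : i + 1 - prev = (i - prev) + 1 := by omega
      rw [h1, List.take_add_one]
      congr 1
      have h2 : (L.drop prev)[i - prev]? = some c := by
        rw [List.getElem?_drop]
        have h3 : prev + (i - prev) = i := by omega
        rw [h3, hget]
      simp [h2]
    by_cases h1 : c = '('
    · rw [show pvCuts i d (c :: cs) = pvCuts (i + 1) (d + 1) cs from by simp [pvCuts, h1],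
        show pvSplitA ((L.drop prev).take (i - prev)) d (c :: cs)
          = pvSplitA ((L.drop prev).take (i - prev) ++ [c]) (d + 1) cs from by
          simp [pvSplitA, h1],
        ← htake_succ, ih L (i + 1) prev (d + 1) acc hdrop' (by omega)]
    · by_cases h2 : c = ')'
      · rw [show pvCuts i d (c :: cs) = pvCuts (i + 1) (d - 1) cs from by simp [pvCuts, h1, h2],
          show pvSplitA ((L.drop prev).take (i - prev)) d (c :: cs)
            = pvSplitA ((L.drop prev).take (i - prev) ++ [c]) (d - 1) cs from by
            simp [pvSplitA, h1, h2],
          ← htake_succ, ih L (i + 1) prev (d - 1) acc hdrop' (by omega)]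
      · by_cases h3 : c = ',' ∧ d = 0
        · rw [show pvCuts i d (c :: cs) = i :: pvCuts (i + 1) d cs from by
              simp [pvCuts, h1, h2, h3],
            show pvSplitA ((L.drop prev).take (i - prev)) d (c :: cs)
              = PySem.Str.strip (String.ofList ((L.drop prev).take (i - prev)))
                :: pvSplitA [] d cs from by simp [pvSplitA, h1, h2, h3]]
          simp only [List.map_cons, List.foldl_cons, pvStepSeg]
          rw [show (Int.ofNat i) = ((i : Nat) : Int) from rfl, PySem.List.slice_natCast,
            show ((i : Nat) : Int) + 1 = ((i + 1 : Nat) : Int) from by push_cast; ring,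
            ih L (i + 1) (i + 1) d
              (acc ++ [PySem.Str.strip (String.ofList ((L.drop prev).take (i - prev)))])
              hdrop' (by omega)]
          simp
        · rw [show pvCuts i d (c :: cs) = pvCuts (i + 1) d cs from by simp [pvCuts, h1, h2, h3],
            show pvSplitA ((L.drop prev).take (i - prev)) d (c :: cs)
              = pvSplitA ((L.drop prev).take (i - prev) ++ [c]) d cs from by
              simp [pvSplitA, h1, h2, h3],
            ← htake_succ, ih L (i + 1) prev d acc hdrop' (by omega)]

-- ===== VERDICT (by name: the statement is the Claim_ definition above) =====
theorem split_enum_members_py_spec : Claim_equal_split_enum_members_py := by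
  intro body _
  unfold Spec_split_enum_members_py split_enum_members_py split_enum_members_py_alt
  rw [pvA_char body.toList [] [] 0]
  have h1 := pvCuts_char body.toList 0 0 []
  simp only [Nat.cast_zero, List.nil_append] at h1
  have h2 := pvKey body.toList body.toList 0 0 0 [] (by simp) (le_refl 0)
  simp only [Nat.cast_zero, List.nil_append, List.drop_zero, Nat.sub_self,
    List.take_zero] at h2
  simp [h1, h2]
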